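-- pv_equiv track=rewrite | github.com/davidjsherman/mimoza | people/Zhukova_Anna/model_generalization/code/SBMLModelGeneralization/sbml_generalization/generalization/MaximizingThread.py | merge_based_on_neighbours
-- ===== SOURCE A (Python) =====
-- def merge_based_on_neighbours(lst):
-- 	new_lst = []
-- 	for neighbours, terms in lst:
-- 		neighbours = set(neighbours)
-- 		to_remove = []
-- 		for (new_neighbours, new_terms) in new_lst:
-- 			if neighbours & new_neighbours:
-- 				neighbours |= new_neighbours
-- 				terms |= new_terms
-- 				to_remove.append((new_neighbours, new_terms))
-- 		new_lst = [it for it in new_lst if not it in to_remove] + [(neighbours, terms)]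
-- 	return new_lst
-- ===== SOURCE B (Python) =====
-- def _find(parent, i):
--     """Live descendant of component id i: follow merge links (only dead ids are
--     keys of parent; each link goes to a strictly larger id)."""
--     while i in parent:
--         i = parent[i]
--     return i
--
-- def merge_based_on_neighbours(lst):
--     # Merge-link forest over component ids, with a dict indexing each neighbour
--     # element to the component it last appeared in: each entry merges only the
--     # components it actually hits instead of scanning the whole accumulated
--     # list. Like A, this mutates the input term sets in place via |=.
--     comps = {}   # live component id -> (neighbour set, term set); ids increase, dict order = output order
--     where = {}   # neighbour element -> id of a component that contained it when last seen
--     parent = {}  # dead component id -> the (larger) id it was merged into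
--     nid = 0
--     for ns, ts in lst:
--         hit = set()
--         for x in ns:
--             if x in where:
--                 r = _find(parent, where[x])
--                 where[x] = r       # shortcut for the next lookup of x
--                 hit.add(r)
--         merged = set(ns)
--         for i in sorted(hit):
--             n2, t2 = comps.pop(i)
--             merged |= n2
--             ts |= t2
--             parent[i] = nid
--         comps[nid] = (merged, ts)
--         for x in ns:
--             if x not in where:
--                 where[x] = nid
--         nid += 1
--     return list(comps.values())
-- ===== Notes on version B (the rewrite author's own statement) =====
-- stated objective: alternative
-- what changed: A rescans the whole accumulated component list (and a to_remove list) for every input entry; B instead keeps a dict from neighbour element to the id of the component it was first seen in, plus a merge-link forest over component ids, so each entry locates exactly the components it shares an element with and merged ids are redirected by following links; it trades A's per-entry list scans for dict/index bookkeeping, which wins when many separate components accumulate but not when everything merges into a few.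
import Mathlib
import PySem

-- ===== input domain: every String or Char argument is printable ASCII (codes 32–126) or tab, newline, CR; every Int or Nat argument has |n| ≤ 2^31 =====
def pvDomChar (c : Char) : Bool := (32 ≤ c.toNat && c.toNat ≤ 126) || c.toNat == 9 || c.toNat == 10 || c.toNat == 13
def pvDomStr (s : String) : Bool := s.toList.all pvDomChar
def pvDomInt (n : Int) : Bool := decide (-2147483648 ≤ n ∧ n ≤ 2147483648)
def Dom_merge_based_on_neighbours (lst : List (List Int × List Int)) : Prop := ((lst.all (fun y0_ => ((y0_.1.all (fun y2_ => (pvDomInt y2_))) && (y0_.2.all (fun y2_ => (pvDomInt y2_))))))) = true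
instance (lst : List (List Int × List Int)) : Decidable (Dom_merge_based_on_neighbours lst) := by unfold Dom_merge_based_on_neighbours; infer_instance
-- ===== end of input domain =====

-- B replaces A's per-entry rescan of the accumulated component list by a dict indexing each
-- neighbour element to a component id plus merge links between ids; the equivalence proved here
-- is about the RETURN value (both Pythons mutate the input term sets in place via |=).
-- ===== PORT A =====
def merge_based_on_neighbours (lst : List (List Int × List Int)) : List (List Int × List Int) :=
  lst.foldl (fun new_lst p =>
    -- neighbours = set(neighbours); to_remove = []; inner loop over new_lst accumulating (neighbours, terms, to_remove)
    let st := new_lst.foldl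
      (fun (st : List Int × List Int × List (List Int × List Int)) q =>
        if PySem.Set.inter st.1 q.1 ≠ [] then      -- `if neighbours & new_neighbours:` (truthiness = nonempty)
          (PySem.Set.union st.1 q.1, PySem.Set.union st.2.1 q.2, st.2.2 ++ [q])
        else st)
      (PySem.Set.ofList p.1, p.2, ([] : List (List Int × List Int)))
    -- new_lst = [it for it in new_lst if not it in to_remove] + [(neighbours, terms)]
    new_lst.filter (fun it => !(st.2.2.contains it)) ++ [(st.1, st.2.1)]) []

-- ===== PORT B =====
-- `_find(parent, i)`: follow merge links until a non-key is reached.  Each followed link goes to a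
-- strictly larger id and consumes a distinct key of `parent`, so `parent.size` steps of fuel are
-- always enough for the while loop (proved in pvFind_chain below).
def pvFind (parent : PySem.Dict Int Int) : Nat → Int → Int
  | 0, i => i
  | fuel + 1, i =>
    match parent.get? i with
    | some j => pvFind parent fuel j
    | none => i

def merge_based_on_neighbours_alt (lst : List (List Int × List Int)) : List (List Int × List Int) :=
  (lst.foldl (fun (st : PySem.Dict Int (List Int × List Int) × PySem.Dict Int Int × PySem.Dict Int Int × Int) p =>
    let comps := st.1
    let parent := st.2.2.1
    let nid := st.2.2.2
    -- hit = set(); for x in ns: if x in where: r = _find(parent, where[x]); where[x] = r; hit.add(r)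
    let hw := p.1.foldl
      (fun (hw : PySem.Set Int × PySem.Dict Int Int) x =>
        match hw.2.get? x with
        | some i =>
          let r := pvFind parent parent.size i
          (PySem.Set.add hw.1 r, hw.2.insert x r)
        | none => hw)
      (PySem.Set.empty, st.2.1)
    -- merged = set(ns); for i in sorted(hit): (n2, t2) = comps.pop(i); merged |= n2; ts |= t2; parent[i] = nid
    let mg := (PySem.List.sorted hw.1 (fun k => k) false).foldl
      (fun (mg : List Int × List Int × PySem.Dict Int (List Int × List Int) × PySem.Dict Int Int) i =>
        let nt := mg.2.2.1.getD i ([], [])   -- comps.pop(i); i is always a live key here, so getD+erase is exact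
        (PySem.Set.union mg.1 nt.1, PySem.Set.union mg.2.1 nt.2, mg.2.2.1.erase i, mg.2.2.2.insert i nid))
      (PySem.Set.ofList p.1, p.2, comps, parent)
    -- comps[nid] = (merged, ts); for x in ns: if x not in where: where[x] = nid; nid += 1
    (mg.2.2.1.insert nid (mg.1, mg.2.1),
     p.1.foldl (fun w x => if w.contains x then w else w.insert x nid) hw.2,
     mg.2.2.2,
     nid + 1))
    (PySem.Dict.empty, PySem.Dict.empty, PySem.Dict.empty, (0 : Int))).1.values

-- ===== PRECONDITION & SPEC =====
def Spec_merge_based_on_neighbours (lst : List (List Int × List Int)) (out : List (List Int × List Int)) : Prop := out = merge_based_on_neighbours_alt lst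
instance (lst : List (List Int × List Int)) (out : List (List Int × List Int)) : Decidable (Spec_merge_based_on_neighbours lst out) := by unfold Spec_merge_based_on_neighbours; infer_instance

-- ===== CLAIM (what is proved, stated in full; the proofs are below) =====
def Claim_equal_merge_based_on_neighbours : Prop := ∀ (lst : List (List Int × List Int)), Dom_merge_based_on_neighbours lst → Spec_merge_based_on_neighbours lst (merge_based_on_neighbours lst)

-- ===== LEMMAS AND PROOFS =====

-- Named copies of the two loop bodies (definitionally the lambdas inside the ports).
def pvStepA (new_lst : List (List Int × List Int)) (p : List Int × List Int) :
    List (List Int × List Int) :=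
  let st := new_lst.foldl
    (fun (st : List Int × List Int × List (List Int × List Int)) q =>
      if PySem.Set.inter st.1 q.1 ≠ [] then
        (PySem.Set.union st.1 q.1, PySem.Set.union st.2.1 q.2, st.2.2 ++ [q])
      else st)
    (PySem.Set.ofList p.1, p.2, ([] : List (List Int × List Int)))
  new_lst.filter (fun it => !(st.2.2.contains it)) ++ [(st.1, st.2.1)]

def pvStB : Type :=
  PySem.Dict Int (List Int × List Int) × PySem.Dict Int Int × PySem.Dict Int Int × Int

-- the three loop bodies of B's step
def pvH (par : PySem.Dict Int Int) (hw : PySem.Set Int × PySem.Dict Int Int) (x : Int) :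
    PySem.Set Int × PySem.Dict Int Int :=
  match hw.2.get? x with
  | some i => (PySem.Set.add hw.1 (pvFind par par.size i), hw.2.insert x (pvFind par par.size i))
  | none => hw

def pvM (nid : Int) (mg : List Int × List Int × PySem.Dict Int (List Int × List Int) × PySem.Dict Int Int)
    (i : Int) : List Int × List Int × PySem.Dict Int (List Int × List Int) × PySem.Dict Int Int :=
  (PySem.Set.union mg.1 (mg.2.2.1.getD i ([], [])).1,
   PySem.Set.union mg.2.1 (mg.2.2.1.getD i ([], [])).2,
   mg.2.2.1.erase i, mg.2.2.2.insert i nid)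

def pvW (nid : Int) (w : PySem.Dict Int Int) (x : Int) : PySem.Dict Int Int :=
  if w.contains x then w else w.insert x nid

def pvStepB (st : pvStB) (p : List Int × List Int) : pvStB :=
  let hw := p.1.foldl (pvH st.2.2.1) (PySem.Set.empty, st.2.1)
  let mg := (PySem.List.sorted hw.1 (fun k => k) false).foldl (pvM st.2.2.2)
    (PySem.Set.ofList p.1, p.2, st.1, st.2.2.1)
  (mg.2.2.1.insert st.2.2.2 (mg.1, mg.2.1),
   p.1.foldl (pvW st.2.2.2) hw.2,
   mg.2.2.2,
   st.2.2.2 + 1)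

theorem pvA_eq_foldl (lst : List (List Int × List Int)) :
    merge_based_on_neighbours lst = lst.foldl pvStepA [] := rfl

theorem pvB_eq_foldl (lst : List (List Int × List Int)) :
    merge_based_on_neighbours_alt lst
      = (lst.foldl pvStepB
          (PySem.Dict.empty, PySem.Dict.empty, PySem.Dict.empty, (0 : Int))).1.values := rfl

-- ---------- merge-link chains ----------
inductive PvChain (par : PySem.Dict Int Int) : Int → Int → Prop
  | refl (i : Int) (h : par.get? i = none) : PvChain par i i
  | step (i j r : Int) (h : par.get? i = some j) (hc : PvChain par j r) : PvChain par i r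

theorem pvChain_root {par : PySem.Dict Int Int} {i r : Int} (h : PvChain par i r) :
    par.get? r = none := by
  induction h with
  | refl _ h => exact h
  | step _ _ _ _ _ ih => exact ih

theorem pvChain_det {par : PySem.Dict Int Int} {i r r' : Int}
    (h : PvChain par i r) (h' : PvChain par i r') : r = r' := by
  induction h generalizing r' with
  | refl i hi =>
    cases h' with
    | refl => rfl
    | step _ j _ hj => rw [hi] at hj; cases hj
  | step i j r hij hc ih =>
    cases h' with
    | refl _ hi => rw [hi] at hij; cases hij
    | step _ j' _ hj hc' =>
      rw [hij] at hj; cases hj; exact ih hc'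

theorem pv_countP_lt {L : List Int} {i j : Int} (hmem : i ∈ L) (hij : i < j) :
    L.countP (fun k => decide (j ≤ k)) < L.countP (fun k => decide (i ≤ k)) := by
  induction L with
  | nil => cases hmem
  | cons a L ih =>
    simp only [List.countP_cons]
    have hmono : L.countP (fun k => decide (j ≤ k)) ≤ L.countP (fun k => decide (i ≤ k)) :=
      List.countP_mono_left (fun k _ h => by simp at h ⊢; omega)
    rcases List.mem_cons.1 hmem with rfl | hm
    · have h1 : (decide (j ≤ i)) = false := by simp; omega
      have h2 : (decide (i ≤ i)) = true := by simp
      rw [h1, h2]; simp; omega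
    · have hstrict := ih hm
      by_cases hja : j ≤ a
      · have hia : i ≤ a := le_trans (le_of_lt hij) hja
        simp [hja, hia]; omega
      · by_cases hia : i ≤ a
        · simp [hja, hia]; omega
        · simp [hja, hia]; omega

theorem pvFind_chain {par : PySem.Dict Int Int}
    (hinc : ∀ k j, par.get? k = some j → k < j) (i : Int) :
    PvChain par i (pvFind par par.size i) := by
  suffices h : ∀ (fuel : Nat) (i : Int),
      par.keys.countP (fun k => decide (i ≤ k)) ≤ fuel → PvChain par i (pvFind par fuel i) by
    refine h par.size i ?_
    calc par.keys.countP (fun k => decide (i ≤ k)) ≤ par.keys.length := List.countP_le_length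
      _ = par.size := by simp [PySem.Dict.keys, PySem.Dict.size]
  intro fuel
  induction fuel with
  | zero =>
    intro i hcnt
    have hnone : par.get? i = none := by
      by_contra hne
      have hi : i ∈ par.keys := by
        by_contra hni
        exact hne ((PySem.Dict.get?_eq_none_iff_not_mem_keys par i).2 hni)
      have : 0 < par.keys.countP (fun k => decide (i ≤ k)) :=
        List.countP_pos_iff.2 ⟨i, hi, by simp⟩
      omega
    exact PvChain.refl i hnone
  | succ fuel ih =>
    intro i hcnt
    cases hij : par.get? i with
    | none => simpa [pvFind, hij] using PvChain.refl i hij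
    | some j =>
      have hi : i ∈ par.keys := by
        by_contra hni
        rw [(PySem.Dict.get?_eq_none_iff_not_mem_keys par i).2 hni] at hij; cases hij
      have hlt := pv_countP_lt hi (hinc i j hij)
      simp only [pvFind, hij]
      exact PvChain.step i j _ hij (ih j (by omega))

-- get? after a loop of inserts with one fixed value
theorem pv_get?_foldl_insert (links : List Int) (par : PySem.Dict Int Int) (v k : Int) :
    (links.foldl (fun d i => d.insert i v) par).get? k
      = if k ∈ links then some v else par.get? k := by
  induction links generalizing par with
  | nil => simp
  | cons l ls ih =>
    simp only [List.foldl_cons, ih]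
    by_cases hls : k ∈ ls
    · simp [hls]
    · by_cases hkl : k = l
      · subst hkl; simp [hls, PySem.Dict.get?_insert_self]
      · simp [hls, hkl, PySem.Dict.get?_insert_of_ne _ _ hkl]

theorem pvChain_extend {par : PySem.Dict Int Int} {links : List Int} {nid : Int}
    (hfresh : ∀ l ∈ links, par.get? l = none) (hnid : nid ∉ links)
    (hnid2 : par.get? nid = none)
    {i r : Int} (h : PvChain par i r) :
    PvChain (links.foldl (fun d l => d.insert l nid) par) i
      (if r ∈ links then nid else r) := by
  induction h with
  | refl i hi =>
    by_cases hil : i ∈ links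
    · simp only [if_pos hil]
      refine PvChain.step _ nid _ ?_ (PvChain.refl _ ?_)
      · rw [pv_get?_foldl_insert]; simp [hil]
      · rw [pv_get?_foldl_insert]; simp [hnid, hnid2]
    · simp only [if_neg hil]
      exact PvChain.refl _ (by rw [pv_get?_foldl_insert]; simp [hil, hi])
  | step i j r hij hc ih =>
    have hil : i ∉ links := fun hm => by rw [hfresh i hm] at hij; cases hij
    exact PvChain.step _ j _ (by rw [pv_get?_foldl_insert]; simp [hil, hij]) ih

-- ---------- generic set/fold facts ----------
theorem pv_mem_foldl_union {β : Type} (f : β → List Int) (R : List β) (s0 : List Int) (x : Int) :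
    x ∈ R.foldl (fun s q => PySem.Set.union s (f q)) s0 ↔ x ∈ s0 ∨ ∃ q ∈ R, x ∈ f q := by
  induction R generalizing s0 with
  | nil => simp
  | cons q R ih =>
    simp only [List.foldl_cons, ih, PySem.Set.mem_union, List.mem_cons]
    constructor
    · rintro ((h | h) | ⟨q', hq', h⟩)
      · exact Or.inl h
      · exact Or.inr ⟨q, Or.inl rfl, h⟩
      · exact Or.inr ⟨q', Or.inr hq', h⟩
    · rintro (h | ⟨q', (rfl | hq'), h⟩)
      · exact Or.inl (Or.inl h)
      · exact Or.inl (Or.inr h)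
      · exact Or.inr ⟨q', hq', h⟩

-- ---------- the A-side step, characterised ----------
def pvTest (ns : List Int) (q : List Int × List Int) : Bool :=
  ns.any (fun x => q.1.contains x)

def pvMergedN (ns : List Int) (R : List (List Int × List Int)) : List Int :=
  R.foldl (fun s q => PySem.Set.union s q.1) (PySem.Set.ofList ns)

def pvMergedT (ts : List Int) (R : List (List Int × List Int)) : List Int :=
  R.foldl (fun s q => PySem.Set.union s q.2) ts

theorem pv_inter_ne_nil (s t : List Int) :
    (PySem.Set.inter s t ≠ []) ↔ ∃ x ∈ s, x ∈ t := by
  simp only [PySem.Set.inter, Ne, List.filter_eq_nil_iff]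
  push Not
  simp

theorem pvTest_iff (ns : List Int) (q : List Int × List Int) :
    pvTest ns q = true ↔ ∃ x ∈ ns, x ∈ q.1 := by
  simp [pvTest, List.any_eq_true]

theorem pvFoldA_aux (ns : List Int) :
    ∀ (L : List (List Int × List Int)) (nb tm : List Int) (rm : List (List Int × List Int)),
    (∀ q ∈ L, ((PySem.Set.inter nb q.1 ≠ []) ↔ pvTest ns q = true)) →
    L.Pairwise (fun a b => ∀ x ∈ a.1, x ∉ b.1) →
    L.foldl
      (fun (st : List Int × List Int × List (List Int × List Int)) q =>
        if PySem.Set.inter st.1 q.1 ≠ [] then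
          (PySem.Set.union st.1 q.1, PySem.Set.union st.2.1 q.2, st.2.2 ++ [q])
        else st)
      (nb, tm, rm)
      = ((L.filter (pvTest ns)).foldl (fun s q => PySem.Set.union s q.1) nb,
         (L.filter (pvTest ns)).foldl (fun s q => PySem.Set.union s q.2) tm,
         rm ++ L.filter (pvTest ns)) := by
  intro L
  induction L with
  | nil => intro nb tm rm _ _; simp
  | cons q L ih =>
    intro nb tm rm hnb hdisj
    rcases List.pairwise_cons.1 hdisj with ⟨hq, hdisj'⟩
    have hqtest := hnb q (List.mem_cons_self ..)
    by_cases htest : pvTest ns q = true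
    · have hcond : PySem.Set.inter nb q.1 ≠ [] := hqtest.2 htest
      simp only [List.foldl_cons, if_pos hcond, List.filter_cons_of_pos htest]
      rw [ih (PySem.Set.union nb q.1) (PySem.Set.union tm q.2) (rm ++ [q]) ?_ hdisj']
      · simp
      · intro q' hq'
        rw [pv_inter_ne_nil, ← hnb q' (List.mem_cons_of_mem _ hq'), pv_inter_ne_nil]
        constructor
        · rintro ⟨x, hxu, hxq'⟩
          rcases (PySem.Set.mem_union nb q.1 x).1 hxu with hx | hx
          · exact ⟨x, hx, hxq'⟩
          · exact absurd hxq' (hq q' hq' x hx)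
        · rintro ⟨x, hx, hxq'⟩
          exact ⟨x, (PySem.Set.mem_union nb q.1 x).2 (Or.inl hx), hxq'⟩
    · have hcond : ¬ (PySem.Set.inter nb q.1 ≠ []) := fun hc => htest (hqtest.1 hc)
      simp only [List.foldl_cons, if_neg hcond,
        List.filter_cons_of_neg (by simpa using htest)]
      exact ih nb tm rm (fun q' hq' => hnb q' (List.mem_cons_of_mem _ hq')) hdisj'

theorem pvStepA_char (newL : List (List Int × List Int)) (ns ts : List Int)
    (hdisj : newL.Pairwise (fun a b => ∀ x ∈ a.1, x ∉ b.1)) :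
    pvStepA newL (ns, ts)
      = newL.filter (fun q => !pvTest ns q)
        ++ [(pvMergedN ns (newL.filter (pvTest ns)), pvMergedT ts (newL.filter (pvTest ns)))] := by
  unfold pvStepA
  rw [pvFoldA_aux ns newL (PySem.Set.ofList ns) ts [] ?_ hdisj]
  · dsimp only
    rw [List.nil_append]
    congr 1
    apply List.filter_congr
    intro it hit
    cases htest : pvTest ns it <;>
      simp [List.mem_filter, hit, htest]
  · intro q hq
    rw [pv_inter_ne_nil, pvTest_iff]
    constructor
    · rintro ⟨x, hx, hxq⟩; exact ⟨x, (PySem.Set.mem_ofList ns x).1 hx, hxq⟩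
    · rintro ⟨x, hx, hxq⟩; exact ⟨x, (PySem.Set.mem_ofList ns x).2 hx, hxq⟩

-- ---------- the B-side phases ----------
def pvRootSpec (w par : PySem.Dict Int Int) (x r : Int) : Prop :=
  ∃ i, w.get? x = some i ∧ PvChain par i r

theorem pvPhase1 {par : PySem.Dict Int Int} (hinc : ∀ k j, par.get? k = some j → k < j) :
    ∀ (ns hit : List Int) (w0 : PySem.Dict Int Int),
    (∀ x r, pvRootSpec ((ns.foldl (pvH par) (hit, w0)).2) par x r ↔ pvRootSpec w0 par x r)
    ∧ (∀ x, ((ns.foldl (pvH par) (hit, w0)).2).get? x = none ↔ w0.get? x = none)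
    ∧ (∀ r, r ∈ (ns.foldl (pvH par) (hit, w0)).1 ↔ r ∈ hit ∨ ∃ x ∈ ns, pvRootSpec w0 par x r)
    ∧ (hit.Nodup → (ns.foldl (pvH par) (hit, w0)).1.Nodup) := by
  intro ns
  induction ns with
  | nil =>
    intro hit w0
    refine ⟨fun _ _ => Iff.rfl, fun _ => Iff.rfl, fun r => ?_, fun h => h⟩
    simp
  | cons x ns ih =>
    intro hit w0
    simp only [List.foldl_cons]
    cases hx : w0.get? x with
    | none =>
      have hstep : pvH par (hit, w0) x = (hit, w0) := by simp [pvH, hx]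
      rw [hstep]
      obtain ⟨a, b, c, d⟩ := ih hit w0
      refine ⟨a, b, fun r => (c r).trans ?_, d⟩
      have hnox : ¬ pvRootSpec w0 par x r := by
        rintro ⟨i, hi, _⟩; rw [hx] at hi; cases hi
      simp only [List.mem_cons]
      constructor
      · rintro (h | ⟨y, hy, h⟩)
        · exact Or.inl h
        · exact Or.inr ⟨y, Or.inr hy, h⟩
      · rintro (h | ⟨y, (rfl | hy), h⟩)
        · exact Or.inl h
        · exact absurd h hnox
        · exact Or.inr ⟨y, hy, h⟩
    | some i =>
      have hc : PvChain par i (pvFind par par.size i) := pvFind_chain hinc i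
      set r0 := pvFind par par.size i with hr0
      have hstep : pvH par (hit, w0) x = (PySem.Set.add hit r0, w0.insert x r0) := by
        simp only [pvH, hx]; rfl
      rw [hstep]
      obtain ⟨a, b, c, d⟩ := ih (PySem.Set.add hit r0) (w0.insert x r0)
      have hspec : ∀ y r, pvRootSpec (w0.insert x r0) par y r ↔ pvRootSpec w0 par y r := by
        intro y r
        by_cases hxy : y = x
        · subst hxy
          unfold pvRootSpec
          simp only [PySem.Dict.get?_insert_self, hx]
          constructor
          · rintro ⟨i', hi', hch⟩
            cases hi'
            cases hch with
            | refl => exact ⟨i, rfl, hc⟩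
            | step _ j _ hj => rw [pvChain_root hc] at hj; cases hj
          · rintro ⟨i', hi', hch⟩
            cases hi'
            have : r = r0 := pvChain_det hch hc
            subst this
            exact ⟨r0, rfl, PvChain.refl _ (pvChain_root hc)⟩
        · unfold pvRootSpec
          rw [PySem.Dict.get?_insert_of_ne _ _ hxy]
      have hxspec : ∀ r, pvRootSpec w0 par x r ↔ r = r0 := by
        intro r
        constructor
        · rintro ⟨i', hi', hch⟩; rw [hx] at hi'; cases hi'; exact pvChain_det hch hc
        · rintro rfl; exact ⟨i, hx, hc⟩
      refine ⟨fun y r => (a y r).trans (hspec y r), fun y => (b y).trans ?_, fun r => (c r).trans ?_, fun h => d (PySem.Set.nodup_add hit r0 h)⟩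
      · by_cases hxy : y = x
        · subst hxy; simp [PySem.Dict.get?_insert_self, hx]
        · rw [PySem.Dict.get?_insert_of_ne _ _ hxy]
      · simp only [PySem.Set.mem_add, List.mem_cons]
        constructor
        · rintro ((h | h) | ⟨y, hy, h⟩)
          · exact Or.inl h
          · exact Or.inr ⟨x, Or.inl rfl, (hxspec r).2 h⟩
          · exact Or.inr ⟨y, Or.inr hy, (hspec y r).1 h⟩
        · rintro (h | ⟨y, (rfl | hy), h⟩)
          · exact Or.inl (Or.inl h)
          · exact Or.inl (Or.inr ((hxspec r).1 h))
          · exact Or.inr ⟨y, hy, (hspec y r).2 h⟩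

theorem pvLastLoop (nid : Int) :
    ∀ (ns : List Int) (w : PySem.Dict Int Int) (x : Int),
    (ns.foldl (pvW nid) w).get? x
      = if w.get? x = none ∧ x ∈ ns then some nid else w.get? x := by
  intro ns
  induction ns with
  | nil => intro w x; simp
  | cons y ns ih =>
    intro w x
    simp only [List.foldl_cons]
    by_cases hcy : w.contains y = true
    · have hstep : pvW nid w y = w := by simp [pvW, hcy]
      rw [hstep, ih]
      have hy : w.get? y ≠ none := by
        simp [PySem.Dict.get?_eq_none_iff_contains, hcy]
      by_cases hx : w.get? x = none
      · by_cases hxy : x = y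
        · subst hxy; exact absurd hx hy
        · simp [hx, hxy]
      · simp [hx]
    · have hstep : pvW nid w y = w.insert y nid := by simp [pvW, hcy]
      have hyn : w.get? y = none := by
        rw [PySem.Dict.get?_eq_none_iff_contains]; simpa using hcy
      rw [hstep, ih]
      by_cases hxy : x = y
      · subst hxy
        simp [PySem.Dict.get?_insert_self, hyn]
      · rw [PySem.Dict.get?_insert_of_ne _ _ hxy]
        simp [hxy]

theorem pvMergeFold_head (nid k : Int) (v : List Int × List Int) :
    ∀ (ys : List Int), k ∉ ys →
    ∀ (M : List (Int × (List Int × List Int))) (N T : List Int) (par : PySem.Dict Int Int),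
    ys.foldl (pvM nid) (N, T, PySem.Dict.mk ((k, v) :: M), par)
      = ((ys.foldl (pvM nid) (N, T, PySem.Dict.mk M, par)).1,
         (ys.foldl (pvM nid) (N, T, PySem.Dict.mk M, par)).2.1,
         PySem.Dict.mk ((k, v) :: ((ys.foldl (pvM nid) (N, T, PySem.Dict.mk M, par)).2.2.1.items)),
         (ys.foldl (pvM nid) (N, T, PySem.Dict.mk M, par)).2.2.2) := by
  intro ys
  induction ys with
  | nil => intro _ M N T par; rfl
  | cons i ys ih =>
    intro hk M N T par
    have hik : ¬ (k = i) := fun h => hk (h ▸ List.mem_cons_self ..)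
    have hki : i ≠ k := fun h => hik h.symm
    simp only [List.foldl_cons]
    have hget : (PySem.Dict.mk ((k, v) :: M)).getD i ([], [])
        = (PySem.Dict.mk M).getD i ([], []) := by
      rw [PySem.Dict.getD_eq_get?_getD, PySem.Dict.getD_eq_get?_getD, PySem.Dict.get?_mk_cons]
      simp [hik]
    have herase : (PySem.Dict.mk ((k, v) :: M)).erase i
        = PySem.Dict.mk ((k, v) :: ((PySem.Dict.mk M).erase i).items) := by
      simp [PySem.Dict.erase, hik]
    have hstep : pvM nid (N, T, PySem.Dict.mk ((k, v) :: M), par) i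
        = (PySem.Set.union N ((PySem.Dict.mk M).getD i ([], [])).1,
           PySem.Set.union T ((PySem.Dict.mk M).getD i ([], [])).2,
           PySem.Dict.mk ((k, v) :: ((PySem.Dict.mk M).erase i).items),
           par.insert i nid) := by
      simp only [pvM, hget, herase]
    rw [hstep, ih (fun h => hk (List.mem_cons_of_mem _ h))]
    rfl

theorem pvMergeFold (nid : Int) (pred : Int → Bool) :
    ∀ (L : List (Int × (List Int × List Int))) (N T : List Int) (par : PySem.Dict Int Int),
    (L.map Prod.fst).Nodup →
    ((L.map Prod.fst).filter pred).foldl (pvM nid) (N, T, PySem.Dict.mk L, par)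
      = ((L.filter (fun kv => pred kv.1)).foldl (fun s kv => PySem.Set.union s kv.2.1) N,
         (L.filter (fun kv => pred kv.1)).foldl (fun s kv => PySem.Set.union s kv.2.2) T,
         PySem.Dict.mk (L.filter (fun kv => !pred kv.1)),
         ((L.map Prod.fst).filter pred).foldl (fun d i => d.insert i nid) par) := by
  intro L
  induction L with
  | nil => intro N T par _; rfl
  | cons kv L ih =>
    intro N T par hnd
    rw [List.map_cons] at hnd
    obtain ⟨hk, hnd'⟩ := List.nodup_cons.1 hnd
    cases hp : pred kv.1 with
    | true =>
      have h1 : ((kv :: L).map Prod.fst).filter pred = kv.1 :: (L.map Prod.fst).filter pred := by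
        simp [hp]
      rw [h1]
      simp only [List.foldl_cons]
      have hget : (PySem.Dict.mk (kv :: L)).getD kv.1 ([], []) = kv.2 := by
        rw [PySem.Dict.getD_eq_get?_getD, PySem.Dict.get?_mk_cons]
        simp
      have herase : (PySem.Dict.mk (kv :: L)).erase kv.1 = PySem.Dict.mk L := by
        simp only [PySem.Dict.erase]
        congr 1
        simp only [List.filter_cons]
        simp only [beq_self_eq_true, Bool.not_true]
        exact List.filter_eq_self.2 (fun p hp' => by
          simp only [Bool.not_eq_eq_eq_not, Bool.not_true, beq_eq_false_iff_ne, ne_eq]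
          exact fun h => hk (h ▸ List.mem_map_of_mem hp'))
      have hstep : pvM nid (N, T, PySem.Dict.mk (kv :: L), par) kv.1
          = (PySem.Set.union N kv.2.1, PySem.Set.union T kv.2.2, PySem.Dict.mk L,
             par.insert kv.1 nid) := by
        simp only [pvM, hget, herase]
      rw [hstep, ih _ _ _ hnd']
      simp [hp]
    | false =>
      have h1 : ((kv :: L).map Prod.fst).filter pred = (L.map Prod.fst).filter pred := by
        simp [hp]
      rw [h1]
      have hknot : kv.1 ∉ (L.map Prod.fst).filter pred :=
        fun h => hk (List.mem_of_mem_filter h)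
      have := pvMergeFold_head nid kv.1 kv.2 ((L.map Prod.fst).filter pred) hknot L N T par
      simp only [Prod.mk.eta] at this
      rw [this, ih _ _ _ hnd']
      simp [hp]

-- ---------- the invariant ----------
structure PvInv (newL : List (List Int × List Int)) (st : pvStB) : Prop where
  values : st.1.values = newL
  keysLt : st.1.keys.Pairwise (· < ·)
  keysBound : ∀ k ∈ st.1.keys, k < st.2.2.2
  parInc : ∀ k j, st.2.2.1.get? k = some j → k < j ∧ j < st.2.2.2
  parDead : ∀ k j, st.2.2.1.get? k = some j → st.1.get? k = none
  w1 : ∀ x i, st.2.1.get? x = some i →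
    ∃ r n t, PvChain st.2.2.1 i r ∧ st.1.get? r = some (n, t) ∧ x ∈ n
  w2 : ∀ r n t, st.1.get? r = some (n, t) → ∀ x ∈ n,
    ∃ i, st.2.1.get? x = some i ∧ PvChain st.2.2.1 i r

theorem pvInv_keysNodup {newL : List (List Int × List Int)} {st : pvStB} (h : PvInv newL st) :
    st.1.keys.Nodup := h.keysLt.imp (fun hlt => ne_of_lt hlt)

theorem pvInv_disj {newL : List (List Int × List Int)} {st : pvStB} (h : PvInv newL st) :
    newL.Pairwise (fun a b => ∀ x ∈ a.1, x ∉ b.1) := by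
  have hnd : st.1.keys.Nodup := pvInv_keysNodup h
  have hkeys : st.1.items.Pairwise (fun a b => a.1 < b.1) := by
    have := h.keysLt
    rwa [PySem.Dict.keys, List.pairwise_map] at this
  have hitems : st.1.items.Pairwise (fun a b => ∀ x ∈ a.2.1, x ∉ b.2.1) := by
    refine hkeys.imp_of_mem ?_
    intro a b ha hb hlt x hxa hxb
    have hga : st.1.get? a.1 = some (a.2.1, a.2.2) :=
      PySem.Dict.get?_of_mem_items _ (by simpa using ha) hnd
    have hgb : st.1.get? b.1 = some (b.2.1, b.2.2) :=
      PySem.Dict.get?_of_mem_items _ (by simpa using hb) hnd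
    obtain ⟨i, hwi, hci⟩ := h.w2 a.1 a.2.1 a.2.2 hga x hxa
    obtain ⟨i', hwi', hci'⟩ := h.w2 b.1 b.2.1 b.2.2 hgb x hxb
    rw [hwi] at hwi'
    cases hwi'
    exact absurd (pvChain_det hci hci') (ne_of_lt hlt)
  rw [← h.values]
  show (st.1.items.map (fun x => x.2)).Pairwise _
  exact (List.pairwise_map).2 hitems

theorem pvStep_inv {newL : List (List Int × List Int)} {st : pvStB}
    (h : PvInv newL st) (p : List Int × List Int) :
    PvInv (pvStepA newL p) (pvStepB st p) := by
  have hdisj := pvInv_disj h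
  have hnd := pvInv_keysNodup h
  obtain ⟨comps, w, par, nid⟩ := st
  obtain ⟨ns, ts⟩ := p
  obtain ⟨hvals, hkeysLt, hbound, hparInc, hparDead, hw10, hw20⟩ := h
  dsimp only at hvals hkeysLt hbound hparInc hparDead hw10 hw20 hnd
  have hinc : ∀ k j, par.get? k = some j → k < j := fun k j hk => (hparInc k j hk).1
  -- phase 1
  obtain ⟨ph_a, ph_b, ph_c, ph_d⟩ := pvPhase1 hinc ns PySem.Set.empty w
  set hw := ns.foldl (pvH par) (PySem.Set.empty, w) with hhw
  have hmemhit : ∀ r, r ∈ hw.1 ↔ ∃ x ∈ ns, pvRootSpec w par x r := by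
    intro r
    rw [ph_c r]
    simp [PySem.Set.empty]
  have hhitnd : hw.1.Nodup := ph_d List.nodup_nil
  set pred : Int → Bool := fun k => hw.1.contains k with hpred
  -- hit members are live keys
  have hitsub : ∀ r ∈ hw.1, r ∈ comps.keys := by
    intro r hr
    obtain ⟨x, _, i, hwi, hch⟩ := (hmemhit r).1 hr
    obtain ⟨r', n, t, hch', hg, _⟩ := hw10 x i hwi
    cases pvChain_det hch hch'
    by_contra hnk
    rw [(PySem.Dict.get?_eq_none_iff_not_mem_keys comps r).2 hnk] at hg
    cases hg
  -- pred on an item = pvTest on its value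
  have hF1 : ∀ kv ∈ comps.items, pred kv.1 = pvTest ns kv.2 := by
    intro kv hkv
    have hg : comps.get? kv.1 = some (kv.2.1, kv.2.2) :=
      PySem.Dict.get?_of_mem_items _ (by simpa using hkv) hnd
    have hiff : kv.1 ∈ hw.1 ↔ pvTest ns kv.2 = true := by
      rw [hmemhit, pvTest_iff]
      constructor
      · rintro ⟨x, hx, i, hwi, hch⟩
        obtain ⟨r', n, t, hch', hg', hxn⟩ := hw10 x i hwi
        cases pvChain_det hch hch'
        rw [hg] at hg'
        cases hg'
        exact ⟨x, hx, hxn⟩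
      · rintro ⟨x, hx, hxn⟩
        obtain ⟨i, hwi, hch⟩ := hw20 kv.1 kv.2.1 kv.2.2 hg x hxn
        exact ⟨x, hx, i, hwi, hch⟩
    have hbool : (hw.1.contains kv.1) = pvTest ns kv.2 := by
      cases htest : pvTest ns kv.2 with
      | true => exact List.contains_iff_mem.2 (hiff.2 htest)
      | false =>
        cases hcc : hw.1.contains kv.1 with
        | false => rfl
        | true => exact absurd (hiff.1 (List.contains_iff_mem.1 hcc)) (by rw [htest]; simp)
    exact hbool
  -- phase 2 : sorted(hit) = keys.filter pred
  have hys : PySem.List.sorted hw.1 (fun k => k) false = comps.keys.filter pred := by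
    refine PySem.List.sorted_eq_of_perm_of_pairwise_lt _ _ _ ?_ ?_
    · refine (List.perm_ext_iff_of_nodup (hnd.filter pred) hhitnd).2 ?_
      intro k
      rw [List.mem_filter, hpred]
      constructor
      · rintro ⟨_, hc⟩; exact List.contains_iff_mem.1 hc
      · intro hk; exact ⟨hitsub k hk, List.contains_iff_mem.2 hk⟩
    · exact hkeysLt.filter pred
  set ys := comps.keys.filter pred with hysdef
  have hyssub : ∀ k ∈ ys, k ∈ comps.keys := fun k hk => List.mem_of_mem_filter hk
  have hyspred : ∀ k ∈ ys, pred k = true := fun k hk => List.of_mem_filter hk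
  have hysmem : ∀ r, r ∈ ys ↔ r ∈ hw.1 := by
    intro r
    rw [hysdef, List.mem_filter, hpred]
    constructor
    · rintro ⟨_, hc⟩; exact List.contains_iff_mem.1 hc
    · intro hk; exact ⟨hitsub r hk, List.contains_iff_mem.2 hk⟩
  have hpredys : ∀ r, pred r = true ↔ r ∈ ys := by
    intro r
    rw [hysmem r]
    exact List.contains_iff_mem
  have hpredtest : ∀ r, pred r = false → r ∉ ys := by
    intro r hr hmem
    rw [(hpredys r).2 hmem] at hr
    cases hr
  -- phase 3 : the merge fold
  have hkeys_eq : comps.keys = comps.items.map Prod.fst := rfl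
  have hmf := pvMergeFold nid pred comps.items (PySem.Set.ofList ns) ts par
      (by rw [← hkeys_eq]; exact hnd)
  rw [← hkeys_eq] at hmf
  -- notation for the merged component
  set F := comps.items.filter (fun kv => pred kv.1) with hF
  set NN := F.foldl (fun s kv => PySem.Set.union s kv.2.1) (PySem.Set.ofList ns) with hNN
  set TT := F.foldl (fun s kv => PySem.Set.union s kv.2.2) ts with hTT
  set par' := ys.foldl (fun d i => d.insert i nid) par with hpar'
  set compsK := PySem.Dict.mk (comps.items.filter (fun kv => !pred kv.1)) with hcompsK
  have hmk : comps = PySem.Dict.mk comps.items := rfl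
  have hstepB : pvStepB (comps, w, par, nid) (ns, ts)
      = (compsK.insert nid (NN, TT), ns.foldl (pvW nid) hw.2, par', nid + 1) := by
    show (_, _, _, _) = _
    rw [← hhw, hys, hysdef, hmk, hmf]
  -- A-side characterisation and the value correspondence
  have hstepA := pvStepA_char newL ns ts hdisj
  have hfilt_pos : F.map (fun kv => kv.2) = newL.filter (pvTest ns) := by
    rw [← hvals]
    show _ = (comps.items.map (fun kv => kv.2)).filter (pvTest ns)
    rw [List.filter_map, hF]
    congr 1
    exact (List.filter_congr (fun kv hkv => by rw [hF1 kv hkv]; rfl)).symm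
  have hfilt_neg : (comps.items.filter (fun kv => !pred kv.1)).map (fun kv => kv.2)
      = newL.filter (fun q => !pvTest ns q) := by
    rw [← hvals]
    show _ = (comps.items.map (fun kv => kv.2)).filter (fun q => !pvTest ns q)
    rw [List.filter_map]
    congr 1
    exact (List.filter_congr (fun kv hkv => by rw [hF1 kv hkv]; rfl)).symm
  have hNA : pvMergedN ns (newL.filter (pvTest ns)) = NN := by
    rw [pvMergedN, ← hfilt_pos, List.foldl_map, hNN]
  have hTA : pvMergedT ts (newL.filter (pvTest ns)) = TT := by
    rw [pvMergedT, ← hfilt_pos, List.foldl_map, hTT]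
  -- the new dict's items
  have hnidfresh : compsK.contains nid = false := by
    rw [← Bool.not_eq_true, PySem.Dict.contains_iff_mem_keys, hcompsK]
    intro hmem
    have hnidk : nid ∈ comps.keys := by
      rw [hkeys_eq]
      obtain ⟨kv, hkv, hkv1⟩ := List.mem_map.1 hmem
      exact List.mem_map.2 ⟨kv, List.mem_of_mem_filter hkv, hkv1⟩
    exact absurd (hbound nid hnidk) (lt_irrefl nid)
  have hitems' : (compsK.insert nid (NN, TT)).items
      = comps.items.filter (fun kv => !pred kv.1) ++ [(nid, (NN, TT))] := by
    rw [PySem.Dict.items_insert_of_not_contains _ _ hnidfresh]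
  have hkeys' : (compsK.insert nid (NN, TT)).keys
      = comps.keys.filter (fun k => !pred k) ++ [nid] := by
    show ((compsK.insert nid (NN, TT)).items.map (fun x => x.1)) = _
    rw [hitems', List.map_append, hkeys_eq, List.filter_map]
    rfl
  -- chain extension facts
  have hfresh : ∀ l ∈ ys, par.get? l = none := by
    intro l hl
    cases hpl : par.get? l with
    | none => rfl
    | some j =>
      exfalso
      have hdead : comps.get? l = none := hparDead l j hpl
      exact (PySem.Dict.get?_eq_none_iff_not_mem_keys comps l).1 hdead (hyssub l hl)
  have hnidys : nid ∉ ys := fun hmem => absurd (hbound nid (hyssub nid hmem)) (lt_irrefl nid)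
  have hnidpar : par.get? nid = none := by
    cases hpn : par.get? nid with
    | none => rfl
    | some j =>
      obtain ⟨h1, h2⟩ := hparInc nid j hpn
      omega
  have hext : ∀ {i r : Int}, PvChain par i r →
      PvChain par' i (if r ∈ ys then nid else r) := by
    intro i r hch
    rw [hpar']
    exact pvChain_extend hfresh hnidys hnidpar hch
  have hpar'get : ∀ k, par'.get? k = if k ∈ ys then some nid else par.get? k := by
    intro k; rw [hpar', pv_get?_foldl_insert]
  have hpar'nid : par'.get? nid = none := by
    rw [hpar'get]
    simp [hnidys, hnidpar]
  -- membership in the merged neighbour set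
  have hmemNN : ∀ x, x ∈ NN ↔ x ∈ ns ∨ ∃ kv ∈ F, x ∈ kv.2.1 := by
    intro x
    rw [hNN, pv_mem_foldl_union (fun kv => kv.2.1) F (PySem.Set.ofList ns) x,
      PySem.Set.mem_ofList]
  -- lookups in the new dict
  have hget'nid : (compsK.insert nid (NN, TT)).get? nid = some (NN, TT) :=
    PySem.Dict.get?_insert_self _ _ _
  have hnd' : (compsK.insert nid (NN, TT)).keys.Nodup := by
    rw [hkeys']
    refine List.Nodup.append (hnd.filter _) (List.nodup_singleton nid) ?_
    intro k hk1 hk2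
    rw [List.mem_singleton] at hk2
    subst hk2
    exact absurd (hbound k (List.mem_of_mem_filter hk1)) (lt_irrefl k)
  have hget'old : ∀ r n t, (r, (n, t)) ∈ comps.items → pred r = false →
      (compsK.insert nid (NN, TT)).get? r = some (n, t) := by
    intro r n t hmem hpr
    refine PySem.Dict.get?_of_mem_items _ ?_ hnd'
    rw [hitems']
    exact List.mem_append_left _ (List.mem_filter.2 ⟨hmem, by rw [hpr]; rfl⟩)
  -- last loop on where
  have hwlast : ∀ x, (ns.foldl (pvW nid) hw.2).get? x
      = if hw.2.get? x = none ∧ x ∈ ns then some nid else hw.2.get? x :=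
    fun x => pvLastLoop nid ns hw.2 x
  rw [hstepB, hstepA]
  constructor
  case values =>
    show ((compsK.insert nid (NN, TT)).items.map (fun x => x.2)) = _
    rw [hitems', List.map_append, hfilt_neg, hNA, hTA]
    rfl
  case keysLt =>
    show ((compsK.insert nid (NN, TT)).keys).Pairwise (· < ·)
    rw [hkeys']
    refine List.pairwise_append.2 ⟨hkeysLt.filter _, List.pairwise_singleton _ _, ?_⟩
    intro k hk k' hk'
    rw [List.mem_singleton] at hk'
    subst hk'
    exact hbound k (List.mem_of_mem_filter hk)
  case keysBound =>
    dsimp only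
    intro k hk
    rw [hkeys'] at hk
    rcases List.mem_append.1 hk with hk | hk
    · have := hbound k (List.mem_of_mem_filter hk); omega
    · rw [List.mem_singleton] at hk; omega
  case parInc =>
    dsimp only
    intro k j hkj
    rw [hpar'get] at hkj
    by_cases hky : k ∈ ys
    · rw [if_pos hky] at hkj
      cases hkj
      have := hbound k (hyssub k hky)
      omega
    · rw [if_neg hky] at hkj
      obtain ⟨h1, h2⟩ := hparInc k j hkj
      omega
  case parDead =>
    dsimp only
    intro k j hkj
    rw [hpar'get] at hkj
    rw [(PySem.Dict.get?_eq_none_iff_not_mem_keys _ _), hkeys']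
    intro hmem
    by_cases hky : k ∈ ys
    · rcases List.mem_append.1 hmem with hm | hm
      · have h1 := List.of_mem_filter hm
        rw [hyspred k hky] at h1
        cases h1
      · rw [List.mem_singleton] at hm
        subst hm
        exact hnidys hky
    · rw [if_neg hky] at hkj
      have hnone : comps.get? k = none := hparDead k j hkj
      have hknk : k ∉ comps.keys := (PySem.Dict.get?_eq_none_iff_not_mem_keys _ _).1 hnone
      rcases List.mem_append.1 hmem with hm | hm
      · exact hknk (List.mem_of_mem_filter hm)
      · rw [List.mem_singleton] at hm
        subst hm
        obtain ⟨h1, h2⟩ := hparInc k j hkj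
        omega
  case w1 =>
    dsimp only
    intro x i hx
    rw [hwlast x] at hx
    split_ifs at hx with hcond
    · cases hx
      refine ⟨nid, NN, TT, PvChain.refl nid hpar'nid, hget'nid, ?_⟩
      exact (hmemNN x).2 (Or.inl hcond.2)
    · have hch0 : PvChain par i (pvFind par par.size i) := pvFind_chain hinc i
      set rstar := pvFind par par.size i with hrstar
      have hspecF : pvRootSpec hw.2 par x rstar := ⟨i, hx, hch0⟩
      obtain ⟨i1, hwi1, hch1⟩ := (ph_a x rstar).1 hspecF
      obtain ⟨r', n, t, hch', hg', hxn⟩ := hw10 x i1 hwi1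
      have hre : r' = rstar := pvChain_det hch' hch1
      subst hre
      have hmemit : (rstar, (n, t)) ∈ comps.items := by
        have hsome : comps.get? rstar = some (n, t) := hg'
        exact PySem.Dict.mem_items_of_get?_eq_some _ hsome
      by_cases hry : rstar ∈ ys
      · refine ⟨nid, NN, TT, ?_, hget'nid, ?_⟩
        · have := hext hch0
          rwa [if_pos hry] at this
        · exact (hmemNN x).2 (Or.inr ⟨(rstar, (n, t)),
            List.mem_filter.2 ⟨hmemit, by rw [hyspred rstar hry]⟩, hxn⟩)
      · refine ⟨rstar, n, t, ?_, ?_, hxn⟩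
        · have := hext hch0
          rwa [if_neg hry] at this
        · refine hget'old rstar n t hmemit ?_
          cases hpr : pred rstar with
          | false => rfl
          | true => exact absurd ((hpredys rstar).1 hpr) hry
  case w2 =>
    dsimp only
    intro r n t hg x hxn
    by_cases hrn : r = nid
    · rw [hrn] at hg ⊢
      rw [hget'nid] at hg
      injection hg with hg2
      injection hg2 with hgn hgt
      subst hgn
      subst hgt
      rcases (hmemNN x).1 hxn with hxns | ⟨kv, hkv, hxkv⟩
      · cases hwx : hw.2.get? x with
        | none =>
          refine ⟨nid, ?_, PvChain.refl nid hpar'nid⟩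
          rw [hwlast x, if_pos ⟨hwx, hxns⟩]
        | some i0 =>
          have hch0 : PvChain par i0 (pvFind par par.size i0) := pvFind_chain hinc i0
          have hspecF : pvRootSpec hw.2 par x (pvFind par par.size i0) := ⟨i0, hwx, hch0⟩
          have hspecW := (ph_a x _).1 hspecF
          have hhit : (pvFind par par.size i0) ∈ hw.1 := (hmemhit _).2 ⟨x, hxns, hspecW⟩
          refine ⟨i0, ?_, ?_⟩
          · rw [hwlast x, if_neg (by simp [hwx])]
            exact hwx
          · have := hext hch0
            rwa [if_pos ((hysmem _).2 hhit)] at this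
      · rw [hF] at hkv
        have hkvL : kv ∈ comps.items := List.mem_of_mem_filter hkv
        have hkvpred : pred kv.1 = true := by
          have := List.of_mem_filter hkv
          simpa using this
        have hgkv : comps.get? kv.1 = some (kv.2.1, kv.2.2) :=
          PySem.Dict.get?_of_mem_items _ (by simpa using hkvL) hnd
        obtain ⟨i1, hwi1, hch1⟩ := hw20 kv.1 kv.2.1 kv.2.2 hgkv x hxkv
        obtain ⟨i0, hwi0, hch0⟩ := (ph_a x kv.1).2 ⟨i1, hwi1, hch1⟩
        refine ⟨i0, ?_, ?_⟩
        · rw [hwlast x, if_neg (by simp [hwi0])]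
          exact hwi0
        · have := hext hch0
          rwa [if_pos ((hpredys kv.1).1 hkvpred)] at this
    · rw [PySem.Dict.get?_insert_of_ne _ _ hrn] at hg
      have hmemK : (r, (n, t)) ∈ compsK.items := PySem.Dict.mem_items_of_get?_eq_some _ hg
      rw [hcompsK] at hmemK
      have hmemit : (r, (n, t)) ∈ comps.items := List.mem_of_mem_filter hmemK
      have hprF : pred r = false := by
        have := List.of_mem_filter hmemK
        simpa using this
      have hgold : comps.get? r = some (n, t) :=
        PySem.Dict.get?_of_mem_items _ hmemit hnd
      obtain ⟨i1, hwi1, hch1⟩ := hw20 r n t hgold x hxn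
      obtain ⟨i0, hwi0, hch0⟩ := (ph_a x r).2 ⟨i1, hwi1, hch1⟩
      refine ⟨i0, ?_, ?_⟩
      · rw [hwlast x, if_neg (by simp [hwi0])]
        exact hwi0
      · have := hext hch0
        rwa [if_neg (hpredtest r hprF)] at this

theorem pvFold_inv (lst : List (List Int × List Int)) {newL : List (List Int × List Int)}
    {st : pvStB} (h : PvInv newL st) :
    PvInv (lst.foldl pvStepA newL) (lst.foldl pvStepB st) := by
  induction lst generalizing newL st with
  | nil => exact h
  | cons p lst ih => exact ih (pvStep_inv h p)

theorem pvInv_init :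
    PvInv [] ((PySem.Dict.empty, PySem.Dict.empty, PySem.Dict.empty, (0 : Int)) : pvStB) := by
  refine ⟨rfl, ?_, ?_, ?_, ?_, ?_, ?_⟩ <;>
    simp [PySem.Dict.keys, PySem.Dict.empty, PySem.Dict.get?]

-- ===== VERDICT (by name: the statement is the Claim_ definition above) =====
theorem merge_based_on_neighbours_spec : Claim_equal_merge_based_on_neighbours := by
  intro lst _
  unfold Spec_merge_based_on_neighbours
  rw [pvA_eq_foldl, pvB_eq_foldl]
  exact ((pvFold_inv lst pvInv_init).values).symm
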